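-- pv_equiv track=rewrite | github.com/macoyshev/FSAvalidator | fsa.py | isFsaComplete
-- ===== SOURCE A (Python) =====
-- def isFsaComplete(alphas, trans):
--     nodes = set()
--     cons = {}
--
--     for i in range(len(trans)):
--         if i % 3 != 1:
--             nodes.add(trans[i])
--
--     for i in nodes:
--         cons[i] = set()
--
--     for i in range(0, len(trans), 3):
--         cons[trans[i]].add(trans[i + 1])
--
--     setAl = set(alphas)
--     for vals in cons.values():
--         if  vals != setAl:
--             return False
--     return True
-- ===== SOURCE B (Python) =====
-- def isFsaComplete(alphas, trans):
--     nodes = {trans[i] for i in range(len(trans)) if i % 3 != 1}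
--     actual = {(trans[i], trans[i + 1]) for i in range(0, len(trans), 3)}
--     required = {(n, s) for n in nodes for s in set(alphas)}
--     return required == actual
-- ===== Notes on version B (the rewrite author's own statement) =====
-- stated objective: simpler
-- what changed: Replaces A's dict-of-sets bucketing plus a per-node set-equality loop with one flat set of (node, symbol) pairs compared for equality against the full product nodes x alphabet.
import Mathlib
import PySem

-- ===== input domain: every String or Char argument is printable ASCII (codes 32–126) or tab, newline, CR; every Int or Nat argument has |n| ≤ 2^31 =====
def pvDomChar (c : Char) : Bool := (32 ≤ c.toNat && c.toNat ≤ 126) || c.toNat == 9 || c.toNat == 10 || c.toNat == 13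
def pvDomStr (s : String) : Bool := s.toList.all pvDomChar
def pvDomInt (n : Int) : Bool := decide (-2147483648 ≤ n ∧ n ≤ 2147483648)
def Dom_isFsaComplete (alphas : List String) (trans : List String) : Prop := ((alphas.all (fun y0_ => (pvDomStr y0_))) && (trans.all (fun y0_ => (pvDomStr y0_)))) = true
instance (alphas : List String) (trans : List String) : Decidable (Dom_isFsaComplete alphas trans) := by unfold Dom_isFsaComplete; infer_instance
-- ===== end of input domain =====

-- B replaces A's dict-of-sets bucketing plus a per-node equality loop with one flat set of
-- (node, symbol) pairs compared against the full product nodes x alphabet (objective: simpler).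


-- ===== PORT A =====
def isFsaComplete (alphas : List String) (trans : List String) : Bool :=
  let nodes : PySem.Set String :=
    (List.range trans.length).foldl
      (fun s i => if i % 3 != 1 then PySem.Set.add s (trans.getD i "") else s)
      PySem.Set.empty
  let cons0 : PySem.Dict String (PySem.Set String) :=
    nodes.foldl (fun d n => d.insert n PySem.Set.empty) PySem.Dict.empty
  let cons : PySem.Dict String (PySem.Set String) :=
    (PySem.List.pyRange 0 (trans.length : Int) 3).foldl
      (fun d i => d.modify (PySem.List.pyGetD trans i "") PySem.Set.empty
          (fun s => PySem.Set.add s (PySem.List.pyGetD trans (i + 1) "")))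
      cons0
  cons.values.all (fun vals => PySem.Set.equal vals (PySem.Set.ofList alphas))

-- ===== PORT B =====
def isFsaComplete_alt (alphas : List String) (trans : List String) : Bool :=
  let nodes : PySem.Set String :=
    PySem.Set.ofList (((List.range trans.length).filter (fun i => i % 3 != 1)).map
      (fun i => trans.getD i ""))
  let actual : PySem.Set (String × String) :=
    PySem.Set.ofList ((PySem.List.pyRange 0 (trans.length : Int) 3).map
      (fun i => (PySem.List.pyGetD trans i "", PySem.List.pyGetD trans (i + 1) "")))
  let required : PySem.Set (String × String) :=
    PySem.Set.ofList (nodes.flatMap (fun n => (PySem.Set.ofList alphas).map (fun s => (n, s))))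
  PySem.Set.equal required actual

-- ===== PRECONDITION & SPEC =====
-- Pre_ excludes exactly the inputs where the Python A raises IndexError (trans[i+1] past the end
-- on the last transition triple, i.e. len(trans) % 3 == 1); B raises there too.
def Pre_isFsaComplete (alphas : List String) (trans : List String) : Prop :=
  trans.length % 3 ≠ 1
instance (alphas : List String) (trans : List String) : Decidable (Pre_isFsaComplete alphas trans) := by unfold Pre_isFsaComplete; infer_instance

def pvWitness_isFsaComplete : List String × List String := (["a"], ["q0", "a", "q0"])

def Spec_isFsaComplete (alphas : List String) (trans : List String) (out : Bool) : Prop := out = isFsaComplete_alt alphas trans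
instance (alphas : List String) (trans : List String) (out : Bool) : Decidable (Spec_isFsaComplete alphas trans out) := by unfold Spec_isFsaComplete; infer_instance

-- ===== CLAIM (what is proved, stated in full; the proofs are below) =====
def Claim_equal_isFsaComplete : Prop := ∀ (alphas : List String) (trans : List String), Dom_isFsaComplete alphas trans → Pre_isFsaComplete alphas trans → Spec_isFsaComplete alphas trans (isFsaComplete alphas trans)

-- ===== LEMMAS AND PROOFS =====

-- A's conditional-add loop builds exactly the set of f-images of the elements passing the test.
theorem foldl_add_if_eq {α β : Type} [BEq β] [LawfulBEq β] (p : α → Bool) (f : α → β)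
    (l : List α) (s : PySem.Set β) :
    l.foldl (fun s i => if p i then PySem.Set.add s (f i) else s) s
      = PySem.Set.update s ((l.filter p).map f) := by
  induction l generalizing s with
  | nil => simp [PySem.Set.update_nil]
  | cons a l ih =>
    by_cases h : p a = true
    · simp [List.foldl_cons, h, ih, PySem.Set.update_cons]
    · rw [List.foldl_cons, if_neg (by simp [h]), ih,
        List.filter_cons_of_neg (by simp [h])]

-- A's per-source modify-add loop: the bucket at k collects the values of list entries keyed k.
theorem getD_foldl_modify_add (l : List Int) (key val : Int → String)
    (d : PySem.Dict String (PySem.Set String)) (k : String) :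
    (l.foldl (fun d i => d.modify (key i) PySem.Set.empty
        (fun s => PySem.Set.add s (val i))) d).getD k PySem.Set.empty
      = PySem.Set.update (d.getD k PySem.Set.empty) ((l.filter (fun i => key i == k)).map val) := by
  induction l generalizing d with
  | nil => simp [PySem.Set.update_nil]
  | cons a l ih =>
    by_cases h : key a = k
    · rw [List.foldl_cons, ih, h, PySem.Dict.getD_modify_self,
        List.filter_cons_of_pos (by simp [h]), List.map_cons, PySem.Set.update_cons]
    · rw [List.foldl_cons, ih, PySem.Dict.getD_modify_of_ne _ _ _ (Ne.symm h),
        List.filter_cons_of_neg (by simp [h])]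

-- updating a set with elements it already has leaves it unchanged
theorem update_of_subset {β : Type} [BEq β] [LawfulBEq β] (s : PySem.Set β) (xs : List β)
    (h : ∀ x ∈ xs, x ∈ s) : PySem.Set.update s xs = s := by
  have hnil : (PySem.Set.ofList xs).filter (fun y => !(PySem.Set.contains s y)) = [] := by
    rw [List.filter_eq_nil_iff]
    intro y hy
    have hm : y ∈ s := h y ((PySem.Set.mem_ofList _ _).mp hy)
    simp [hm, PySem.Set.contains_eq_listContains]
  rw [PySem.Set.update_eq_append_filter, hnil, List.append_nil]

-- A's initialisation loop: every bucket starts (and, if never touched, stays) empty.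
theorem getD_foldl_insert_const (ns : List String) (d : PySem.Dict String (PySem.Set String))
    (k : String) (h : d.getD k PySem.Set.empty = PySem.Set.empty) :
    (ns.foldl (fun d n => d.insert n PySem.Set.empty) d).getD k PySem.Set.empty
      = PySem.Set.empty := by
  induction ns generalizing d with
  | nil => exact h
  | cons a ns ih =>
    refine ih _ ?_
    rw [PySem.Dict.getD_insert]
    split
    · rfl
    · exact h

-- Core bridge: A's dict-of-buckets all-equal check coincides with B's product-vs-pairs set equality,
-- for any node set, symbol set, index list and key/val extractors with keys landing in the node set.
theorem bridge (nodes : PySem.Set String) (hnd : nodes.Nodup) (setAl : PySem.Set String)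
    (idx : List Int) (key val : Int → String) (hkey : ∀ i ∈ idx, key i ∈ nodes) :
    ((idx.foldl (fun d i => d.modify (key i) PySem.Set.empty
          (fun s => PySem.Set.add s (val i)))
        (nodes.foldl (fun d n => d.insert n PySem.Set.empty) PySem.Dict.empty)).values.all
      (fun vals => PySem.Set.equal vals setAl))
    = PySem.Set.equal
        (PySem.Set.ofList (nodes.flatMap (fun n => setAl.map (fun s => (n, s)))))
        (PySem.Set.ofList (idx.map (fun i => (key i, val i)))) := by
  set cons0 := nodes.foldl (fun d n => d.insert n PySem.Set.empty) PySem.Dict.empty with hc0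
  set cons := idx.foldl (fun d i => d.modify (key i) PySem.Set.empty
      (fun s => PySem.Set.add s (val i))) cons0 with hc
  have hkeys : cons.keys = nodes := by
    rw [hc, PySem.Dict.keys_foldl_modify_key, hc0, PySem.Dict.keys_foldl_insert,
      PySem.Dict.keys_empty, PySem.Set.update_nil_left, PySem.Set.ofList_eq_self_of_nodup _ hnd]
    exact update_of_subset _ _ (by simpa using hkey)
  have hval : ∀ k, cons.getD k PySem.Set.empty
      = PySem.Set.ofList ((idx.filter (fun i => key i == k)).map val) := by
    intro k
    rw [hc, getD_foldl_modify_add,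
      getD_foldl_insert_const _ _ _ (PySem.Dict.getD_empty _ _), PySem.Set.update_empty]
  rw [PySem.Dict.values_eq_map_keys cons (hkeys ▸ hnd) PySem.Set.empty, hkeys, List.all_map,
    Bool.eq_iff_iff]
  simp only [List.all_eq_true, Function.comp, PySem.Set.equal_iff, hval, PySem.Set.mem_ofList,
    List.mem_map, List.mem_filter, List.mem_flatMap, beq_iff_eq]
  constructor
  · intro H p
    constructor
    · rintro ⟨n, hn, s, hs, rfl⟩
      obtain ⟨i, ⟨hi, hk⟩, hv⟩ := (H n hn s).mpr hs
      exact ⟨i, hi, by rw [hk, hv]⟩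
    · rintro ⟨i, hi, rfl⟩
      exact ⟨key i, hkey i hi, val i, (H _ (hkey i hi) _).mp ⟨i, ⟨hi, rfl⟩, rfl⟩, rfl⟩
  · intro E x hx y
    constructor
    · rintro ⟨i, ⟨hi, hk⟩, hv⟩
      obtain ⟨n, hn, s, hs, heq⟩ := (E (key i, val i)).mpr ⟨i, hi, rfl⟩
      injection heq with h1 h2
      exact hv ▸ h2 ▸ hs
    · intro hy
      obtain ⟨i, hi, heq⟩ := (E (x, y)).mp ⟨x, hx, y, hy, rfl⟩
      injection heq with h1 h2
      exact ⟨i, ⟨hi, h1⟩, h2⟩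

-- the two ports agree (the indices fed to A's bucket loop are sources, hence nodes)
theorem ports_eq (alphas trans : List String) :
    isFsaComplete alphas trans = isFsaComplete_alt alphas trans := by
  unfold isFsaComplete isFsaComplete_alt
  simp only [foldl_add_if_eq, PySem.Set.update_empty]
  refine bridge _ (PySem.Set.nodup_ofList _) _ _ _ _ ?_
  intro i hi
  rw [PySem.List.mem_pyRange_iff_of_pos (by norm_num)] at hi
  obtain ⟨h0, hlt, hdvd⟩ := hi
  rw [PySem.List.pyGetD_of_nonneg _ _ h0, PySem.Set.mem_ofList]
  refine List.mem_map.mpr ⟨i.toNat, List.mem_filter.mpr ⟨List.mem_range.mpr (by omega), ?_⟩, rfl⟩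
  have h3 : i.toNat % 3 = 0 := by omega
  simp [h3]

-- ===== VERDICT (by name: the statement is the Claim_ definition above) =====
theorem isFsaComplete_spec : Claim_equal_isFsaComplete := by
  intro alphas trans _ _
  show isFsaComplete alphas trans = isFsaComplete_alt alphas trans
  exact ports_eq alphas trans
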